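-- pv_equiv track=rewrite | github.com/rushi718/Competitive-Coding | Codechef/Practice Problems/Prime_Xor.py | val2
-- ===== SOURCE A (Python) =====
-- def val2(x,y):
--     b=2
--     a=b^x
--     c=b^y
--     temp=[a,b,c]
--     for i in range(len(temp)):
--         temp[i]%=2
--     if(temp.count(0)==1):
--         return [a,b,c]
--     return []
-- ===== SOURCE B (Python) =====
-- def val2(x, y):
--     # Branch-free: repeat the triple (x&y&1) times; the AND of the low bits is 1
--     # exactly when x and y are both odd, which is when A's count test fires.
--     return [x ^ 2, 2, y ^ 2] * (x & y & 1)
-- ===== Notes on version B (the rewrite author's own statement) =====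
-- stated objective: alternative
-- what changed: Replaced A's temp list, in-place mod loop and count(0)==1 test with a branch-free expression: the triple is repeated (x & y & 1) times via list repetition, so the bitwise AND of the low bits replaces the whole loop/count machinery and there is no conditional at all.
import Mathlib
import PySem

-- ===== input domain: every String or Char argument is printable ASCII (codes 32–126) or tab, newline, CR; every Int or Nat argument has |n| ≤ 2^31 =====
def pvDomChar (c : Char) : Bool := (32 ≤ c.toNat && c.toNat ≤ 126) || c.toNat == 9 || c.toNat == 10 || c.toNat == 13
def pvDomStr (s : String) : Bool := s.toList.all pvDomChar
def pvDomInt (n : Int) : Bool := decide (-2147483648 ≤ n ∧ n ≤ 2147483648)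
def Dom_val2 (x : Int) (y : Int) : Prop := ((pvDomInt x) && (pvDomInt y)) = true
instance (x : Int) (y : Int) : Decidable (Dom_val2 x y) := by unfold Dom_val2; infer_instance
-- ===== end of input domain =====

-- B is branch-free: it repeats the triple (x & y & 1) times (list repetition), replacing
-- A's temp list, mod loop and count(0)==1 test; an alternative decomposition, same cost.

-- ===== PORT A =====
def val2 (x : Int) (y : Int) : List Int :=
  let b : Int := 2
  let a : Int := PySem.Int.bxor b x
  let c : Int := PySem.Int.bxor b y
  let temp : List Int := [a, b, c]
  let temp : List Int :=
    (PySem.List.pyRange 0 temp.length 1).foldl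
      (fun t i => t.set i.toNat (PySem.Int.mod (t.getD i.toNat 0) 2)) temp
  if PySem.List.count temp 0 == 1 then [a, b, c] else []

-- ===== PORT B =====
def val2_alt (x : Int) (y : Int) : List Int :=
  PySem.List.pyRepeat [PySem.Int.bxor x 2, 2, PySem.Int.bxor y 2]
    (PySem.Int.band (PySem.Int.band x y) 1)

-- ===== PRECONDITION & SPEC =====
def Spec_val2 (x : Int) (y : Int) (out : List Int) : Prop := out = val2_alt x y
instance (x : Int) (y : Int) (out : List Int) : Decidable (Spec_val2 x y out) := by unfold Spec_val2; infer_instance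

-- ===== CLAIM (what is proved, stated in full; the proofs are below) =====
def Claim_equal_val2 : Prop := ∀ (x : Int) (y : Int), Dom_val2 x y → Spec_val2 x y (val2 x y)

-- ===== LEMMAS AND PROOFS =====

theorem pv_fmod2 (a : Int) : a.fmod 2 = a % 2 := by
  rw [Int.fmod_eq_emod]; simp

theorem pv_natpar (n : Nat) : (2 ^^^ n) % 2 = n % 2 := by
  have h := Nat.testBit_xor 2 n 0
  simp [Nat.testBit_zero] at h
  rcases Nat.mod_two_eq_zero_or_one n with h1 | h1 <;> simp [h1] at h ⊢

-- xor with 2 preserves parity (Python semantics, any sign)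
theorem pv_parity (x : Int) : PySem.Int.mod (PySem.Int.bxor 2 x) 2 = PySem.Int.mod x 2 := by
  unfold PySem.Int.bxor PySem.Int.mod
  rw [if_pos (by norm_num : (0:Int) ≤ 2)]
  have h2 : (2:Int).toNat = 2 := rfl
  split
  · rw [pv_fmod2, pv_fmod2, h2]
    have := pv_natpar x.toNat
    omega
  · rw [pv_fmod2, pv_fmod2, h2]
    have := pv_natpar (-x - 1).toNat
    omega

theorem pv_range3 : PySem.List.pyRange 0 3 1 = [0, 1, 2] := by decide

theorem pv_parity' (x : Int) : PySem.Int.bxor 2 x % 2 = x % 2 := by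
  have h := pv_parity x
  unfold PySem.Int.mod at h
  rwa [pv_fmod2, pv_fmod2] at h

-- low bit of a Nat AND / OR, phrased as omega-friendly disjunctions
theorem pv_natand (m n : Nat) :
    ((m &&& n) % 2 = 1 ∧ m % 2 = 1 ∧ n % 2 = 1) ∨
    ((m &&& n) % 2 = 0 ∧ (m % 2 = 0 ∨ n % 2 = 0)) := by
  have h : (m &&& n) % 2 = 1 ↔ (m % 2 = 1 ∧ n % 2 = 1) := by
    simpa [Nat.testBit_zero] using Nat.testBit_and m n 0
  rcases Nat.mod_two_eq_zero_or_one (m &&& n) with hc | hc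
  · right
    refine ⟨hc, ?_⟩
    rcases Nat.mod_two_eq_zero_or_one m with h1 | h1
    · exact Or.inl h1
    · rcases Nat.mod_two_eq_zero_or_one n with h2 | h2
      · exact Or.inr h2
      · exact absurd (h.mpr ⟨h1, h2⟩) (by omega)
  · exact Or.inl ⟨hc, h.mp hc⟩

theorem pv_nator (m n : Nat) :
    ((m ||| n) % 2 = 0 ∧ m % 2 = 0 ∧ n % 2 = 0) ∨
    ((m ||| n) % 2 = 1 ∧ (m % 2 = 1 ∨ n % 2 = 1)) := by
  have h : (m ||| n) % 2 = 1 ↔ (m % 2 = 1 ∨ n % 2 = 1) := by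
    simpa [Nat.testBit_zero] using Nat.testBit_or m n 0
  rcases Nat.mod_two_eq_zero_or_one (m ||| n) with hc | hc
  · left
    refine ⟨hc, ?_, ?_⟩ <;>
    · rcases Nat.mod_two_eq_zero_or_one m with h1 | h1 <;>
        rcases Nat.mod_two_eq_zero_or_one n with h2 | h2 <;>
          first
          | assumption
          | (exfalso; exact absurd (h.mpr (by omega)) (by omega))
  · exact Or.inr ⟨hc, h.mp hc⟩

-- low bit of a Python band, any signs
theorem pv_band_mod (x y : Int) : PySem.Int.band x y % 2 = x % 2 * (y % 2) := by
  have hx : x % 2 = 0 ∨ x % 2 = 1 := by omega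
  have hy : y % 2 = 0 ∨ y % 2 = 1 := by omega
  unfold PySem.Int.band
  split
  · split
    · have h := pv_natand x.toNat y.toNat
      rcases hx with hx | hx <;> rcases hy with hy | hy <;> rw [hx, hy] <;> omega
    · have h := pv_natand x.toNat (-y - 1).toNat
      have h2 := Nat.and_le_left (n := x.toNat) (m := (-y - 1).toNat)
      rcases hx with hx | hx <;> rcases hy with hy | hy <;> rw [hx, hy] <;> omega
  · split
    · have h := pv_natand y.toNat (-x - 1).toNat
      have h2 := Nat.and_le_left (n := y.toNat) (m := (-x - 1).toNat)
      rcases hx with hx | hx <;> rcases hy with hy | hy <;> rw [hx, hy] <;> omega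
    · have h := pv_nator (-x - 1).toNat (-y - 1).toNat
      rcases hx with hx | hx <;> rcases hy with hy | hy <;> rw [hx, hy] <;> omega

theorem pv_band1 (x y : Int) :
    PySem.Int.band (PySem.Int.band x y) 1 = x % 2 * (y % 2) := by
  rw [PySem.Int.band_one]
  unfold PySem.Int.mod
  rw [pv_fmod2]
  exact pv_band_mod x y

theorem val2_spec_aux (x y : Int) : val2 x y = val2_alt x y := by
  unfold val2 val2_alt
  simp only [List.length_cons, List.length_nil]
  norm_num [pv_range3, List.foldl, List.set, List.getD, List.getElem?_cons_zero,
    List.getElem?_cons_succ, Int.toNat_zero, Int.toNat_one, Option.getD_some]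
  simp only [(by decide : (2 : Int).toNat = 2)]
  simp only [List.set, List.getElem_cons_succ, List.getElem_cons_zero]
  simp only [pv_parity']
  simp only [PySem.Int.bxor_comm 2 x, PySem.Int.bxor_comm 2 y]
  rw [pv_band1]
  rcases (by omega : x % 2 = 0 ∨ x % 2 = 1) with hmx | hmx <;>
    rcases (by omega : y % 2 = 0 ∨ y % 2 = 1) with hmy | hmy <;>
      simp only [hmx, hmy] <;>
      simp [List.count, PySem.List.pyRepeat]

-- ===== VERDICT (by name: the statement is the Claim_ definition above) =====
theorem val2_spec : Claim_equal_val2 := by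
  intro x y _
  unfold Spec_val2
  exact val2_spec_aux x y
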